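-- pv_equiv track=rewrite | github.com/11Igy11/ConduVia | core/parser.py | build_registry_columns
-- ===== SOURCE A (Python) =====
-- from typing import Any
--
-- PREFERRED_COLUMNS = [
--     "src_ip", "src_port", "dst_ip", "dst_port",
--     "protocol", "application_name", "requested_server_name",
--     "bidirectional_first_seen_ms", "bidirectional_last_seen_ms",
--     "bidirectional_duration_ms",
--     "bidirectional_packets", "bidirectional_bytes",
-- ]
--
-- def build_registry_columns(flows: list[dict[str, Any]]) -> list[str]:
--     all_cols: set[str] = set()
--     for f in flows:
--         if isinstance(f, dict):
--             all_cols.update(f.keys())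
--
--     cols: list[str] = []
--     for c in PREFERRED_COLUMNS:
--         if c in all_cols:
--             cols.append(c)
--
--     # add the rest alphabetically
--     for c in sorted(all_cols):
--         if c not in cols:
--             cols.append(c)
--
--     return cols
-- ===== SOURCE B (Python) =====
-- PREFERRED_COLUMNS = [
--     "src_ip", "src_port", "dst_ip", "dst_port",
--     "protocol", "application_name", "requested_server_name",
--     "bidirectional_first_seen_ms", "bidirectional_last_seen_ms",
--     "bidirectional_duration_ms",
--     "bidirectional_packets", "bidirectional_bytes",
-- ]
--
--
-- def build_registry_columns(flows):
--     pref_index = {c: i for i, c in enumerate(PREFERRED_COLUMNS)}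
--     fallback = len(PREFERRED_COLUMNS)
--     all_cols = set()
--     for f in flows:
--         if isinstance(f, dict):
--             all_cols.update(f.keys())
--     return sorted(all_cols, key=lambda c: (pref_index.get(c, fallback), c))
-- ===== Notes on version B (the rewrite author's own statement) =====
-- stated objective: faster
-- what changed: Replaces A's two output-building loops (preferred scan with membership appends, then a scan of sorted columns filtered by a linear 'c not in cols' list search) by a single keyed sort of the column set, keyed by (preferred-index-or-fallback, name).
import Mathlib
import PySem

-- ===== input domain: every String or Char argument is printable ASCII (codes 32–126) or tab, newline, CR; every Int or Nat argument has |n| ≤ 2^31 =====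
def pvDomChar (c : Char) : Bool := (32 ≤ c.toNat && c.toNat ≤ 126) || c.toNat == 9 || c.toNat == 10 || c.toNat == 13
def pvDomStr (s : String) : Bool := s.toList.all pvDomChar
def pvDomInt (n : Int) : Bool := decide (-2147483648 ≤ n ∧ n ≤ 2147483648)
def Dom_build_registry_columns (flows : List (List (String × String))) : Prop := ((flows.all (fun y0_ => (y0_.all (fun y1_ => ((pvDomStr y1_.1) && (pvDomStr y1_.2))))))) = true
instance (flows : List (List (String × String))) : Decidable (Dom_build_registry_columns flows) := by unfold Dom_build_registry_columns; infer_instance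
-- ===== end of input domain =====

-- B replaces A's two output-building loops (incl. a quadratic 'c not in cols' list scan) by one keyed sort (key = (preferred index or fallback, name)); same results, measured faster.

def PREFERRED_COLUMNS : List String := [
  "src_ip", "src_port", "dst_ip", "dst_port",
  "protocol", "application_name", "requested_server_name",
  "bidirectional_first_seen_ms", "bidirectional_last_seen_ms",
  "bidirectional_duration_ms",
  "bidirectional_packets", "bidirectional_bytes"]

-- ===== PORT A =====
def build_registry_columns (flows : List (List (String × String))) : List String :=
  let all_cols : PySem.Set String :=
    flows.foldl (fun s f => PySem.Set.update s (PySem.Dict.keys (PySem.Dict.mk f))) PySem.Set.empty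
  let cols : List String :=
    PREFERRED_COLUMNS.foldl (fun cols c => if PySem.Set.contains all_cols c then cols ++ [c] else cols) []
  (PySem.List.sorted all_cols (fun c => c)).foldl
    (fun cols c => if cols.contains c then cols else cols ++ [c]) cols

-- ===== PORT B =====
-- pref_index = {c: i for i, c in enumerate(PREFERRED_COLUMNS)}
def pvPrefIndex : PySem.Dict String Int :=
  (PySem.List.enumerate PREFERRED_COLUMNS).foldl (fun d p => d.insert p.2 p.1) PySem.Dict.empty

def build_registry_columns_alt (flows : List (List (String × String))) : List String :=
  let fallback : Int := PREFERRED_COLUMNS.length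
  let all_cols : PySem.Set String :=
    flows.foldl (fun s f => PySem.Set.update s (PySem.Dict.keys (PySem.Dict.mk f))) PySem.Set.empty
  PySem.List.sorted2 all_cols (fun c => pvPrefIndex.getD c fallback) (fun c => c)

-- ===== PRECONDITION & SPEC =====
def Spec_build_registry_columns (flows : List (List (String × String))) (out : List String) : Prop := out = build_registry_columns_alt flows
instance (flows : List (List (String × String))) (out : List String) : Decidable (Spec_build_registry_columns flows out) := by unfold Spec_build_registry_columns; infer_instance

-- ===== CLAIM (what is proved, stated in full; the proofs are below) =====
def Claim_equal_build_registry_columns : Prop := ∀ (flows : List (List (String × String))), Dom_build_registry_columns flows → Spec_build_registry_columns flows (build_registry_columns flows)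

-- ===== LEMMAS AND PROOFS =====

-- the lexicographic sort key B uses, as a single linearly ordered key
def pvKey (c : String) : Lex (Int × String) := toLex (pvPrefIndex.getD c 12, c)

lemma pv_k1_lt_of_mem {c : String} (h : c ∈ PREFERRED_COLUMNS) : pvPrefIndex.getD c 12 < 12 := by
  fin_cases h <;> decide

lemma pv_k1_of_not_mem {c : String} (h : c ∉ PREFERRED_COLUMNS) : pvPrefIndex.getD c 12 = 12 := by
  simp [PREFERRED_COLUMNS] at h
  obtain ⟨h1, h2, h3, h4, h5, h6, h7, h8, h9, h10, h11, h12⟩ := h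
  show (PySem.Dict.mk _).getD c 12 = 12
  simp [pvPrefIndex, PREFERRED_COLUMNS, PySem.List.enumerate, PySem.Dict.getD_eq_get?_getD,
    PySem.Dict.get?_mk_cons, PySem.Dict.insert, PySem.Dict.empty, PySem.Dict.get?,
    Ne.symm h1, Ne.symm h2, Ne.symm h3, Ne.symm h4, Ne.symm h5, Ne.symm h6,
    Ne.symm h7, Ne.symm h8, Ne.symm h9, Ne.symm h10, Ne.symm h11, Ne.symm h12]

lemma pv_pairwise_preferred : PREFERRED_COLUMNS.Pairwise (fun a b => pvPrefIndex.getD a 12 < pvPrefIndex.getD b 12) := by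
  decide

-- sorted2 with identity tiebreak is sorted with the lexicographic key
lemma pv_sorted2_eq_sorted_lex (xs : List String) (k1 : String → Int) :
    PySem.List.sorted2 xs k1 (fun c => c) = PySem.List.sorted xs (fun c => toLex (k1 c, c)) := by
  show xs.foldl _ [] = xs.foldl _ []
  congr 1
  funext acc x
  congr 1
  funext a b
  rcases lt_trichotomy (k1 a) (k1 b) with h | h | h <;>
    simp [Prod.Lex.lt_iff, h, le_of_lt, not_lt_of_gt, le_of_eq, h.le] <;>
    omega

-- A's second loop: appending the not-yet-present elements of a duplicate-free list is a filter
lemma pv_loop2 (T : List String) (P : List String) (hnd : T.Nodup) :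
    T.foldl (fun cols c => if cols.contains c then cols else cols ++ [c]) P
      = P ++ T.filter (fun c => !(P.contains c)) := by
  induction T generalizing P with
  | nil => simp
  | cons c T ih =>
    rcases List.nodup_cons.mp hnd with ⟨hc, hT⟩
    by_cases h : P.contains c
    · simp only [List.foldl_cons, h, if_pos, List.filter_cons, Bool.not_eq_true', h]
      simpa [h] using ih P hT
    · simp only [List.foldl_cons, h, if_neg, Bool.false_eq_true, not_false_iff, List.filter_cons]
      rw [ih (P ++ [c]) hT]
      simp only [Bool.not_false, if_true, List.append_assoc, List.singleton_append]
      have : T.filter (fun x => !((P ++ [c]).contains x)) = T.filter (fun x => !(P.contains x)) := by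
        apply List.filter_congr
        intro x hx
        have hxc : x ≠ c := fun e => hc (e ▸ hx)
        simp [hxc]
      rw [this]

-- the accumulated set of all columns is duplicate-free
lemma pv_nodup_allcols (flows : List (List (String × String))) (s : PySem.Set String) (hs : s.Nodup) :
    (flows.foldl (fun s f => PySem.Set.update s (PySem.Dict.keys (PySem.Dict.mk f))) s).Nodup := by
  induction flows generalizing s with
  | nil => simpa
  | cons f flows ih => exact ih _ (PySem.Set.nodup_update _ _ hs)

-- ===== VERDICT (by name: the statement is the Claim_ definition above) =====
theorem build_registry_columns_spec : Claim_equal_build_registry_columns := by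
  intro flows _
  unfold Spec_build_registry_columns build_registry_columns build_registry_columns_alt
  simp only []
  set S := flows.foldl (fun s f => PySem.Set.update s (PySem.Dict.keys (PySem.Dict.mk f))) PySem.Set.empty with hS
  have hSnd : S.Nodup := pv_nodup_allcols flows _ List.nodup_nil
  have hlen : ((PREFERRED_COLUMNS.length : Nat) : Int) = 12 := by decide
  rw [hlen, pv_sorted2_eq_sorted_lex, PySem.List.foldl_append_if_eq_filter]
  set key : String → Lex (Int × String) := fun c => toLex (pvPrefIndex.getD c 12, c) with hkey
  set P := PREFERRED_COLUMNS.filter (fun c => PySem.Set.contains S c) with hP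
  set T := PySem.List.sorted S (fun c => c) with hT
  have hTperm : T.Perm S := PySem.List.sorted_perm S _ _
  have hTnd : T.Nodup := (hTperm.nodup_iff).mpr hSnd
  have hTlt : T.Pairwise (fun a b : String => a < b) := by
    have hle : T.Pairwise (fun a b : String => a ≤ b) := PySem.List.sorted_pairwise S _
    exact (hle.and hTnd).imp (fun h => lt_of_le_of_ne h.1 h.2)
  rw [List.nil_append, pv_loop2 T P hTnd]
  set F := T.filter (fun c => !(P.contains c)) with hF
  have hmemS : ∀ x : String, PySem.Set.contains S x = true ↔ x ∈ S := by
    intro x; simp [PySem.Set.contains]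
  have hmemP : ∀ x : String, x ∈ P ↔ x ∈ PREFERRED_COLUMNS ∧ x ∈ S := by
    intro x; rw [hP, List.mem_filter, hmemS]
  have hmemF : ∀ x : String, x ∈ F ↔ x ∈ S ∧ x ∉ P := by
    intro x
    rw [hF, List.mem_filter]
    constructor
    · rintro ⟨hxT, hxc⟩
      refine ⟨hTperm.mem_iff.mp hxT, ?_⟩
      simp only [Bool.not_eq_true', List.contains_eq_mem, decide_eq_false_iff_not] at hxc
      exact hxc
    · rintro ⟨hxS, hxP⟩
      refine ⟨hTperm.mem_iff.mpr hxS, ?_⟩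
      simp only [Bool.not_eq_true', List.contains_eq_mem, decide_eq_false_iff_not]
      exact hxP
  have hFnotPref : ∀ x : String, x ∈ F → x ∉ PREFERRED_COLUMNS := by
    intro x hxF hpref
    rcases (hmemF x).mp hxF with ⟨hxS, hxP⟩
    exact hxP ((hmemP x).mpr ⟨hpref, hxS⟩)
  have hPnd : P.Nodup := by
    have : PREFERRED_COLUMNS.Nodup := by decide
    exact this.filter _
  have hFnd : F.Nodup := hTnd.filter _
  have hdisj : P.Disjoint F := by
    intro x hxP hxF
    exact ((hmemF x).mp hxF).2 hxP
  have hperm : (P ++ F).Perm S := by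
    rw [List.perm_ext_iff_of_nodup (hPnd.append hFnd hdisj) hSnd]
    intro x
    constructor
    · intro hx
      rcases List.mem_append.mp hx with hx | hx
      · exact ((hmemP x).mp hx).2
      · exact ((hmemF x).mp hx).1
    · intro hxS
      by_cases hxP : x ∈ P
      · exact List.mem_append.mpr (Or.inl hxP)
      · exact List.mem_append.mpr (Or.inr ((hmemF x).mpr ⟨hxS, hxP⟩))
  have hpair : (P ++ F).Pairwise (fun a b => key a < key b) := by
    rw [List.pairwise_append]
    refine ⟨?_, ?_, ?_⟩
    · have hp : P.Pairwise (fun a b => pvPrefIndex.getD a 12 < pvPrefIndex.getD b 12) :=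
        pv_pairwise_preferred.filter _
      exact hp.imp (fun h => by simp [hkey, Prod.Lex.lt_iff]; exact Or.inl h)
    · have hp : F.Pairwise (fun a b : String => a < b) := hTlt.filter _
      refine List.Pairwise.imp_of_mem ?_ hp
      intro a b ha hb hab
      have h12a : pvPrefIndex.getD a 12 = 12 := pv_k1_of_not_mem (hFnotPref a ha)
      have h12b : pvPrefIndex.getD b 12 = 12 := pv_k1_of_not_mem (hFnotPref b hb)
      simp [hkey, Prod.Lex.lt_iff, h12a, h12b, hab]
    · intro a ha b hb
      have hlt : pvPrefIndex.getD a 12 < 12 := pv_k1_lt_of_mem ((hmemP a).mp ha).1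
      have h12 : pvPrefIndex.getD b 12 = 12 := pv_k1_of_not_mem (hFnotPref b hb)
      simp [hkey, Prod.Lex.lt_iff, h12]
      exact Or.inl hlt
  exact (PySem.List.sorted_eq_of_perm_of_pairwise_lt S (P ++ F) key hperm hpair).symm
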